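-- pv_equiv track=rewrite | github.com/mpygruu/advent-of-code-2022 | day08/scenic_score_trees_counter.py | trees_visible_right
-- ===== SOURCE A (Python) =====
-- def trees_visible_right(row: list[int], index: int) -> int:
--     trees_visible = 0
--     previous_max = 0
--     for i in range(index+1, len(row)):
--         if row[i] < row[index]:
--             trees_visible += 1
--         elif row[i] >= row[index]:
--             trees_visible += 1
--             break
--
--
--     return trees_visible
-- ===== SOURCE B (Python) =====
-- def trees_visible_right(row: list[int], index: int) -> int:
--     n = len(row)
--     positions = range(index + 1, n)
--     if not positions:
--         return 0
--     h = row[index]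
--     # stage 1: prefix maxima of the values seen to the right (no early exit)
--     maxes = []
--     m = row[positions[0]]
--     for i in positions:
--         if row[i] > m:
--             m = row[i]
--         maxes.append(m)
--     # stage 2: binary search for the first prefix whose maximum blocks the view
--     lo, hi = 0, len(maxes)
--     while lo < hi:
--         mid = (lo + hi) // 2
--         if maxes[mid] >= h:
--             hi = mid
--         else:
--             lo = mid + 1
--     return lo + 1 if lo < len(maxes) else lo
-- ===== Notes on version B (the rewrite author's own statement) =====
-- stated objective: alternative
-- what changed: Replaced the counting break-loop with two stages: a full pass building the nondecreasing prefix-maximum array of the trees to the right, then a binary search on that array for the first prefix maximum >= the tree's height, from which the answer is derived arithmetically.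
import Mathlib
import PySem

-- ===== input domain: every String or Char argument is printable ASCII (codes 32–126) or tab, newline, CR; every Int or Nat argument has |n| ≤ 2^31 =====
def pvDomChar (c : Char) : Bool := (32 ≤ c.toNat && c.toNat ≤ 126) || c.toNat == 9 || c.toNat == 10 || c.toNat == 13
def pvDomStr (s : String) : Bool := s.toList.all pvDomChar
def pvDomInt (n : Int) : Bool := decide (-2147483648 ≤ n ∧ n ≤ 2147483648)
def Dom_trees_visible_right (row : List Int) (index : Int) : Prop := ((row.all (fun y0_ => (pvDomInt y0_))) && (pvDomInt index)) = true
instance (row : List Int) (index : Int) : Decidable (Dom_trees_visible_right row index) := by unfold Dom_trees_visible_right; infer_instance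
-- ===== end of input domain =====

-- B replaces A's counting break-loop by a prefix-maximum pass plus binary search (objective: alternative, same O(n)).


-- ===== PORT A =====
-- the for-loop with break, counting trees; row[i] / row[index] via pyGet? (in range under Pre_)
def tvrLoopA (row : List Int) (index : Int) : List Int → Int
  | [] => 0
  | i :: rest =>
    if (PySem.List.pyGet? row i).getD 0 < (PySem.List.pyGet? row index).getD 0 then
      1 + tvrLoopA row index rest
    else if (PySem.List.pyGet? row i).getD 0 ≥ (PySem.List.pyGet? row index).getD 0 then
      1
    else
      tvrLoopA row index rest

def trees_visible_right (row : List Int) (index : Int) : Int :=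
  tvrLoopA row index (PySem.List.pyRange (index + 1) ((row.length : Int)) 1)

-- ===== PORT B =====
-- stage 1 of Source B: the loop appending the running maximum (`maxes`)
def tvrMaxes (row : List Int) : List Int → Int → List Int
  | [], _ => []
  | i :: rest, m =>
    let m' := if (PySem.List.pyGet? row i).getD 0 > m then (PySem.List.pyGet? row i).getD 0 else m
    m' :: tvrMaxes row rest m'

-- stage 2 of Source B: the while-loop binary search (lo, hi); Python's local `mid = (lo + hi) // 2` is inlined
def tvrBisect (maxes : List Int) (h : Int) (lo hi : Int) : Int :=
  if hlt : lo < hi then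
    if (PySem.List.pyGet? maxes (PySem.Int.floordiv (lo + hi) 2)).getD 0 ≥ h then
      tvrBisect maxes h lo (PySem.Int.floordiv (lo + hi) 2)
    else
      tvrBisect maxes h (PySem.Int.floordiv (lo + hi) 2 + 1) hi
  else lo
termination_by (hi - lo).toNat
decreasing_by
  · have h2 : PySem.Int.floordiv (lo + hi) 2 < hi := by
      rw [PySem.Int.floordiv_lt_iff_lt_mul (by omega : (0:Int) < 2)]; omega
    omega
  · have h1 := (PySem.Int.floordiv_two_mid_bounds (le_of_lt hlt)).1
    omega

def trees_visible_right_alt (row : List Int) (index : Int) : Int :=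
  let positions := PySem.List.pyRange (index + 1) ((row.length : Int)) 1
  if positions = [] then 0
  else
    let h := (PySem.List.pyGet? row index).getD 0
    let maxes := tvrMaxes row positions ((PySem.List.pyGet? row positions.headI).getD 0)
    let lo := tvrBisect maxes h 0 ((maxes.length : Int))
    if lo < (maxes.length : Int) then lo + 1 else lo

-- ===== PRECONDITION & SPEC =====
-- Pre_ excludes exactly the inputs where Python A raises IndexError (row[index] with index < -len(row)
-- while the loop body runs); everywhere else A returns normally (B raises on exactly the same inputs).
def Pre_trees_visible_right (row : List Int) (index : Int) : Prop :=
  -((row.length : Int)) ≤ index ∨ ((row.length : Int)) ≤ index + 1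
instance (row : List Int) (index : Int) : Decidable (Pre_trees_visible_right row index) := by
  unfold Pre_trees_visible_right; infer_instance
def pvWitness_trees_visible_right : List Int × Int := ([3, 1, 4, 2], 1)

def Spec_trees_visible_right (row : List Int) (index : Int) (out : Int) : Prop := out = trees_visible_right_alt row index
instance (row : List Int) (index : Int) (out : Int) : Decidable (Spec_trees_visible_right row index out) := by unfold Spec_trees_visible_right; infer_instance

-- ===== CLAIM (what is proved, stated in full; the proofs are below) =====
def Claim_equal_trees_visible_right : Prop := ∀ (row : List Int) (index : Int), Dom_trees_visible_right row index → Pre_trees_visible_right row index → Spec_trees_visible_right row index (trees_visible_right row index)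

-- ===== LEMMAS AND PROOFS =====

-- A's loop, abstracted to the list of compared values
def tvrCnt (h : Int) : List Int → Int
  | [] => 0
  | x :: r => if x < h then 1 + tvrCnt h r else 1

-- B's prefix-max stage, abstracted to the list of values
def tvrPmax (m : Int) : List Int → List Int
  | [] => []
  | x :: r => (if x > m then x else m) :: tvrPmax (if x > m then x else m) r

theorem tvrLoopA_eq_cnt (row : List Int) (index : Int) (l : List Int) :
    tvrLoopA row index l =
      tvrCnt ((PySem.List.pyGet? row index).getD 0) (l.map (fun i => (PySem.List.pyGet? row i).getD 0)) := by
  induction l with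
  | nil => rfl
  | cons i rest ih =>
    simp only [tvrLoopA, tvrCnt, List.map]
    by_cases hlt : (PySem.List.pyGet? row i).getD 0 < (PySem.List.pyGet? row index).getD 0
    · rw [if_pos hlt, if_pos hlt, ih]
    · rw [if_neg hlt, if_neg hlt, if_pos (by omega)]

theorem tvrMaxes_eq_pmax (row : List Int) (l : List Int) (m : Int) :
    tvrMaxes row l m = tvrPmax m (l.map (fun i => (PySem.List.pyGet? row i).getD 0)) := by
  induction l generalizing m with
  | nil => rfl
  | cons i rest ih => simp only [tvrMaxes, tvrPmax, List.map]; rw [ih]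

theorem tvrPmax_length (m : Int) (xs : List Int) : (tvrPmax m xs).length = xs.length := by
  induction xs generalizing m with
  | nil => rfl
  | cons x r ih => simp [tvrPmax, ih]

theorem tvrPmax_ge_self (m : Int) (xs : List Int) (k : ℕ) (hk : k < xs.length) :
    xs[k] ≤ (tvrPmax m xs)[k]'(by rw [tvrPmax_length]; exact hk) := by
  induction xs generalizing m k with
  | nil => simp at hk
  | cons x r ih =>
    cases k with
    | zero => simp only [tvrPmax, List.getElem_cons_zero]; split <;> omega
    | succ k' => simpa only [tvrPmax] using ih _ k' (by simpa using hk)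

theorem tvrPmax_succ (m : Int) (xs : List Int) (k : ℕ) (hk : k + 1 < xs.length) :
    (tvrPmax m xs)[k+1]'(by rw [tvrPmax_length]; exact hk) =
      (if xs[k+1] > (tvrPmax m xs)[k]'(by rw [tvrPmax_length]; omega) then xs[k+1]
       else (tvrPmax m xs)[k]'(by rw [tvrPmax_length]; omega)) := by
  induction xs generalizing m k with
  | nil => simp at hk
  | cons x r ih =>
    cases k with
    | zero =>
      cases r with
      | nil => simp at hk
      | cons y r' => simp [tvrPmax]
    | succ k' => simpa only [tvrPmax] using ih _ k' (by simpa using hk)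

theorem tvrPmax_mono (m : Int) (xs : List Int) (i j : ℕ) (hij : i ≤ j) (hj : j < xs.length) :
    (tvrPmax m xs)[i]'(by rw [tvrPmax_length]; omega) ≤ (tvrPmax m xs)[j]'(by rw [tvrPmax_length]; omega) := by
  induction j with
  | zero =>
    have hi0 : i = 0 := by omega
    subst hi0; exact le_refl _
  | succ j' ih =>
    rcases Nat.lt_or_ge i (j'+1) with hlt | hge
    · have step := tvrPmax_succ m xs j' hj
      have hi' := ih (by omega) (by omega)
      rw [step]; split <;> omega
    · have : i = j' + 1 := by omega
      subst this; exact le_refl _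

theorem tvrPmax_head (m : Int) (x : Int) (r : List Int) :
    (tvrPmax m (x :: r))[0]'(by rw [tvrPmax_length]; simp) = (if x > m then x else m) := by
  simp [tvrPmax]

-- binary-search correctness on a monotone list
theorem tvrBisect_spec (maxes : List Int) (h : Int)
    (Hmono : ∀ i j : ℕ, (hij : i ≤ j) → (hj : j < maxes.length) →
      maxes[i]'(by omega) ≤ maxes[j]) :
    ∀ lo hi : Int, 0 ≤ lo → lo ≤ hi → hi ≤ (maxes.length : Int) →
    (∀ k : ℕ, (k : Int) < lo → (hk : k < maxes.length) → maxes[k] < h) →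
    (∀ k : ℕ, hi ≤ (k : Int) → (hk : k < maxes.length) → h ≤ maxes[k]) →
    0 ≤ tvrBisect maxes h lo hi ∧ tvrBisect maxes h lo hi ≤ (maxes.length : Int) ∧
    (∀ k : ℕ, (k : Int) < tvrBisect maxes h lo hi → (hk : k < maxes.length) → maxes[k] < h) ∧
    (∀ k : ℕ, tvrBisect maxes h lo hi ≤ (k : Int) → (hk : k < maxes.length) → h ≤ maxes[k]) := by
  intro lo hi
  have H : ∀ n : ℕ, ∀ lo hi : Int, (hi - lo).toNat = n → 0 ≤ lo → lo ≤ hi → hi ≤ (maxes.length : Int) →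
      (∀ k : ℕ, (k : Int) < lo → (hk : k < maxes.length) → maxes[k] < h) →
      (∀ k : ℕ, hi ≤ (k : Int) → (hk : k < maxes.length) → h ≤ maxes[k]) →
      0 ≤ tvrBisect maxes h lo hi ∧ tvrBisect maxes h lo hi ≤ (maxes.length : Int) ∧
      (∀ k : ℕ, (k : Int) < tvrBisect maxes h lo hi → (hk : k < maxes.length) → maxes[k] < h) ∧
      (∀ k : ℕ, tvrBisect maxes h lo hi ≤ (k : Int) → (hk : k < maxes.length) → h ≤ maxes[k]) := by
    intro n
    induction n using Nat.strong_induction_on with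
    | _ n ih =>
      intro lo hi hn h0 hle hhi Hlo Hhi
      by_cases hlt : lo < hi
      · have hmid1 : lo ≤ PySem.Int.floordiv (lo + hi) 2 :=
          (PySem.Int.floordiv_two_mid_bounds (le_of_lt hlt)).1
        have hmid2 : PySem.Int.floordiv (lo + hi) 2 < hi := by
          rw [PySem.Int.floordiv_lt_iff_lt_mul (by omega : (0:Int) < 2)]; omega
        obtain ⟨mn, hmn⟩ : ∃ mn : ℕ, PySem.Int.floordiv (lo + hi) 2 = (mn : Int) :=
          ⟨(PySem.Int.floordiv (lo + hi) 2).toNat, by omega⟩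
        rw [hmn] at hmid1 hmid2
        have hmnlt : mn < maxes.length := by omega
        have hget : (PySem.List.pyGet? maxes ((mn : Int))).getD 0 = maxes[mn] := by
          simp [List.getElem?_eq_getElem hmnlt]
        rw [tvrBisect, dif_pos hlt, hmn, hget]
        by_cases hp : maxes[mn] ≥ h
        · rw [if_pos hp]
          exact ih ((mn : Int) - lo).toNat (by omega) lo (mn : Int) rfl h0 (by omega) (by omega) Hlo
            (fun k hk hklt => le_trans hp (Hmono mn k (by omega) hklt))
        · rw [if_neg hp]
          refine ih (hi - ((mn : Int) + 1)).toNat (by omega) ((mn : Int) + 1) hi rfl (by omega) (by omega) hhi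
            (fun k hk hklt => ?_) Hhi
          have : maxes[k] ≤ maxes[mn] := Hmono k mn (by omega) hmnlt
          omega
      · rw [tvrBisect, dif_neg hlt]
        have : lo = hi := by omega
        subst this
        exact ⟨h0, hhi, Hlo, Hhi⟩
  exact fun h0 hle hhi => H (hi - lo).toNat lo hi rfl h0 hle hhi

-- the counting loop result, characterised by the least blocking position
theorem tvrCnt_of_least (h : Int) (vals : List Int) (r : ℕ)
    (Hbelow : ∀ k : ℕ, (hk : k < vals.length) → k < r → vals[k] < h)
    (Hat : ∀ hr : r < vals.length, h ≤ vals[r])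
    (Hle : r ≤ vals.length) :
    tvrCnt h vals = if r < vals.length then (r : Int) + 1 else (vals.length : Int) := by
  induction vals generalizing r with
  | nil => simp [tvrCnt]
  | cons x rest ih =>
    cases r with
    | zero =>
      have hx : h ≤ x := Hat (by simp)
      simp only [tvrCnt, if_neg (by omega : ¬ x < h)]
      rw [if_pos (by simp)]
      norm_num
    | succ r' =>
      have hx : x < h := Hbelow 0 (by simp) (by omega)
      simp only [tvrCnt, if_pos hx]
      rw [ih r' (fun k hk hkr => by simpa using Hbelow (k+1) (by simpa using hk) (by omega))
        (fun hr => by simpa using Hat (by simpa using hr)) (by simpa using Hle)]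
      by_cases hrl : r' < rest.length
      · rw [if_pos hrl, if_pos (by simp; omega)]; push_cast; ring
      · rw [if_neg hrl, if_neg (by simp; omega)]; simp; omega

-- both stages of B, on the abstract nonempty value list, equal A's count
theorem tvrStage (h v : Int) (vs : List Int) :
    (if tvrBisect (tvrPmax v (v :: vs)) h 0 ((tvrPmax v (v :: vs)).length : Int) <
        ((tvrPmax v (v :: vs)).length : Int)
      then tvrBisect (tvrPmax v (v :: vs)) h 0 ((tvrPmax v (v :: vs)).length : Int) + 1
      else tvrBisect (tvrPmax v (v :: vs)) h 0 ((tvrPmax v (v :: vs)).length : Int))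
    = tvrCnt h (v :: vs) := by
  have hlen : (tvrPmax v (v :: vs)).length = (v :: vs).length := tvrPmax_length _ _
  have Hmono : ∀ i j : ℕ, (hij : i ≤ j) → (hj : j < (tvrPmax v (v :: vs)).length) →
      (tvrPmax v (v :: vs))[i]'(by omega) ≤ (tvrPmax v (v :: vs))[j] := by
    intro i j hij hj
    exact tvrPmax_mono v (v :: vs) i j hij (by omega)
  obtain ⟨hb0, hble, Hbelow, Habove⟩ :=
    tvrBisect_spec (tvrPmax v (v :: vs)) h Hmono 0 ((tvrPmax v (v :: vs)).length : Int)
      le_rfl (by omega) le_rfl (by intro k hk hklt; omega) (by intro k hk hklt; omega)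
  obtain ⟨rn, hrcast⟩ : ∃ rn : ℕ,
      (rn : Int) = tvrBisect (tvrPmax v (v :: vs)) h 0 ((tvrPmax v (v :: vs)).length : Int) :=
    ⟨(tvrBisect (tvrPmax v (v :: vs)) h 0 ((tvrPmax v (v :: vs)).length : Int)).toNat, by omega⟩
  rw [← hrcast] at hb0 hble Hbelow Habove ⊢
  have Hvbelow : ∀ k : ℕ, (hk : k < (v :: vs).length) → k < rn → (v :: vs)[k] < h := by
    intro k hk hkr
    have h1 := Hbelow k (by omega) (by omega)
    have h2 := tvrPmax_ge_self v (v :: vs) k hk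
    omega
  have Hvat : ∀ hrl : rn < (v :: vs).length, h ≤ (v :: vs)[rn] := by
    intro hrl
    have hmr := Habove rn (by omega) (by omega)
    cases rn with
    | zero =>
      have hh := tvrPmax_head v v vs
      rw [if_neg (by omega : ¬ v > v)] at hh
      rw [hh] at hmr
      simpa using hmr
    | succ k =>
      have hstep := tvrPmax_succ v (v :: vs) k (by omega)
      have hmk := Hbelow k (by omega) (by omega)
      rw [hstep] at hmr
      by_cases hc : (v :: vs)[k+1]'(by omega) > (tvrPmax v (v :: vs))[k]'(by omega)
      · rw [if_pos hc] at hmr; exact hmr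
      · rw [if_neg hc] at hmr; omega
  have hcnt := tvrCnt_of_least h (v :: vs) rn Hvbelow Hvat (by omega)
  rw [hcnt]
  by_cases hfin : (rn : Int) < ((tvrPmax v (v :: vs)).length : Int)
  · rw [if_pos hfin, if_pos (by omega)]
  · rw [if_neg hfin, if_neg (by omega)]
    omega

-- ===== VERDICT (by name: the statement is the Claim_ definition above) =====
theorem trees_visible_right_spec : Claim_equal_trees_visible_right := by
  intro row index _ _
  unfold Spec_trees_visible_right trees_visible_right
  simp only [trees_visible_right_alt]
  by_cases hnil : PySem.List.pyRange (index + 1) ((row.length : Int)) 1 = []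
  · rw [if_pos hnil, hnil]
    rfl
  · rw [if_neg hnil]
    obtain ⟨p, rest, hcons⟩ := List.exists_cons_of_ne_nil hnil
    rw [hcons, tvrLoopA_eq_cnt, tvrMaxes_eq_pmax]
    simp only [List.headI, List.map_cons]
    exact (tvrStage ((PySem.List.pyGet? row index).getD 0) ((PySem.List.pyGet? row p).getD 0)
      (rest.map (fun i => (PySem.List.pyGet? row i).getD 0))).symm
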